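-- pv_equiv track=rewrite | github.com/BaoBaoIT-maker/23110178_HuynhHoaiBao_DoAnCaNhan | DoAnCaNhan.py | get_possible_moves_with_names
-- ===== SOURCE A (Python) =====
-- def get_possible_moves_with_names(state_1d):
--     moves = []
--     zero_idx = state_1d.index(0) if 0 in state_1d else -1
--     if zero_idx == -1: return []
--     r, c = zero_idx // 3, zero_idx % 3
--     pot_moves = [(-1, 0, "UP"), (1, 0, "DOWN"), (0, -1, "LEFT"), (0, 1, "RIGHT")]
--     for dr, dc, name in pot_moves:
--         nr, nc = r + dr, c + dc
--         if 0 <= nr < 3 and 0 <= nc < 3: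
--             new_s = state_1d[:]
--             tile_to_move = nr * 3 + nc
--             new_s[zero_idx], new_s[tile_to_move] = new_s[tile_to_move], new_s[zero_idx]
--             moves.append((new_s, name))
--     return moves
-- ===== SOURCE B (Python) =====
-- _NEIGHBORS = {
--     0: [(3, "DOWN"), (1, "RIGHT")],
--     1: [(4, "DOWN"), (0, "LEFT"), (2, "RIGHT")],
--     2: [(5, "DOWN"), (1, "LEFT")],
--     3: [(0, "UP"), (6, "DOWN"), (4, "RIGHT")],
--     4: [(1, "UP"), (7, "DOWN"), (3, "LEFT"), (5, "RIGHT")],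
--     5: [(2, "UP"), (8, "DOWN"), (4, "LEFT")],
--     6: [(3, "UP"), (7, "RIGHT")],
--     7: [(4, "UP"), (6, "LEFT"), (8, "RIGHT")],
--     8: [(5, "UP"), (7, "LEFT")],
-- }
--
-- def _swap(state_1d, z, j):
--     return [state_1d[j] if i == z else state_1d[z] if i == j else v
--             for i, v in enumerate(state_1d)]
--
-- def get_possible_moves_with_names(state_1d):
--     if 0 not in state_1d:
--         return []
--     z = state_1d.index(0)
--     return [(_swap(state_1d, z, j), name) for j, name in _NEIGHBORS.get(z, [])]
-- ===== Notes on version B (the rewrite author's own statement) =====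
-- stated objective: simpler
-- what changed: B replaces the row/column arithmetic and the four bounds-checked delta branches with a static adjacency table mapping each blank position 0..8 to its valid (neighbor, move-name) pairs, and builds each successor by an index-based comprehension swap instead of copy-then-double-assignment.
-- outside the precondition, e.g. on get_possible_moves_with_names([1, 0, 2]): A raises IndexError, B raises IndexError
import Mathlib
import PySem

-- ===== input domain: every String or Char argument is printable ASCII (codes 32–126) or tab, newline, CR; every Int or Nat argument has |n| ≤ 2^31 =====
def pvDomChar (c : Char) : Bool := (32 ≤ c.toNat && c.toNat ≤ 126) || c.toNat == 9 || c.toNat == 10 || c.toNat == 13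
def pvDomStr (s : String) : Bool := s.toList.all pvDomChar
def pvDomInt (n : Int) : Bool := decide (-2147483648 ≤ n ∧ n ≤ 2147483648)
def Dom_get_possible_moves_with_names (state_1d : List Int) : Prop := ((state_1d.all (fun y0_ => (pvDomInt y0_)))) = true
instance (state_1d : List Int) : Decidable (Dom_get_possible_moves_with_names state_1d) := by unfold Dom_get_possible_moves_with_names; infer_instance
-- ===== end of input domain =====

-- B replaces A's row/column arithmetic + bounds branches with a static adjacency table and a
-- comprehension-based swap; objective: simpler. Equivalence is claimed on the 8-puzzle domain (Pre_).

-- ===== PORT A =====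
-- The Python tuple-swap 'new_s[z], new_s[t] = new_s[t], new_s[z]' is ported by hand with
-- List.set/getD; exact for the in-range non-negative indices admitted by Pre_.
def get_possible_moves_with_names (state_1d : List Int) : List (List Int × String) :=
  let zero_idx : Int :=
    match PySem.List.index? state_1d 0 with
    | some k => (k : Int)
    | none => -1
  if zero_idx = -1 then []
  else
    let r := PySem.Int.floordiv zero_idx 3
    let c := PySem.Int.mod zero_idx 3
    let pot_moves : List (Int × Int × String) :=
      [(-1, 0, "UP"), (1, 0, "DOWN"), (0, -1, "LEFT"), (0, 1, "RIGHT")]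
    pot_moves.foldl (fun moves m =>
      let nr := r + m.1
      let nc := c + m.2.1
      if 0 ≤ nr ∧ nr < 3 ∧ 0 ≤ nc ∧ nc < 3 then
        let tile_to_move := nr * 3 + nc
        let new_s := (state_1d.set zero_idx.toNat (state_1d.getD tile_to_move.toNat 0)).set
                        tile_to_move.toNat (state_1d.getD zero_idx.toNat 0)
        moves ++ [(new_s, m.2.2)]
      else moves) []

-- ===== PORT B =====
def pvNeighbors : PySem.Dict Int (List (Int × String)) := PySem.Dict.ofList
  [ (0, [(3, "DOWN"), (1, "RIGHT")]),
    (1, [(4, "DOWN"), (0, "LEFT"), (2, "RIGHT")]),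
    (2, [(5, "DOWN"), (1, "LEFT")]),
    (3, [(0, "UP"), (6, "DOWN"), (4, "RIGHT")]),
    (4, [(1, "UP"), (7, "DOWN"), (3, "LEFT"), (5, "RIGHT")]),
    (5, [(2, "UP"), (8, "DOWN"), (4, "LEFT")]),
    (6, [(3, "UP"), (7, "RIGHT")]),
    (7, [(4, "UP"), (6, "LEFT"), (8, "RIGHT")]),
    (8, [(5, "UP"), (7, "LEFT")]) ]

-- Source B's _swap comprehension; the in-range indexing state_1d[j] is ported as getD (exact under Pre_).
def pvAltSwap (state_1d : List Int) (z j : Int) : List Int :=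
  (PySem.List.enumerate state_1d 0).map (fun p =>
    if p.1 = z then state_1d.getD j.toNat 0
    else if p.1 = j then state_1d.getD z.toNat 0
    else p.2)

def get_possible_moves_with_names_alt (state_1d : List Int) : List (List Int × String) :=
  match PySem.List.index? state_1d 0 with
  | none => []
  | some z =>
      (PySem.Dict.getD pvNeighbors (z : Int) []).map
        (fun e => (pvAltSwap state_1d (z : Int) e.1, e.2))

-- ===== PRECONDITION & SPEC =====
-- Pre_ excludes lists that contain 0 but do not have length 9 (not an 8-puzzle board): on such
-- inputs A raises IndexError, or returns accidental off-board swaps for a blank at index ≥ 9, or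
-- (on some short boards) happens to coincide with B; all are outside the function's 8-puzzle domain.
def Pre_get_possible_moves_with_names (state_1d : List Int) : Prop :=
  (0 : Int) ∉ state_1d ∨ state_1d.length = 9
instance (state_1d : List Int) : Decidable (Pre_get_possible_moves_with_names state_1d) := by
  unfold Pre_get_possible_moves_with_names; infer_instance

def pvWitness_get_possible_moves_with_names : List Int := [1, 2, 3, 4, 0, 5, 6, 7, 8]

def Spec_get_possible_moves_with_names (state_1d : List Int) (out : List (List Int × String)) : Prop := out = get_possible_moves_with_names_alt state_1d
instance (state_1d : List Int) (out : List (List Int × String)) : Decidable (Spec_get_possible_moves_with_names state_1d out) := by unfold Spec_get_possible_moves_with_names; infer_instance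

-- ===== CLAIM (what is proved, stated in full; the proofs are below) =====
def Claim_equal_get_possible_moves_with_names : Prop := ∀ (state_1d : List Int), Dom_get_possible_moves_with_names state_1d → Pre_get_possible_moves_with_names state_1d → Spec_get_possible_moves_with_names state_1d (get_possible_moves_with_names state_1d)

-- ===== LEMMAS AND PROOFS =====

-- B's comprehension swap equals A's set/set swap for in-range non-negative indices.
lemma pvAltSwap_eq_set_set (s : List Int) (zi ji : Int) (hz0 : 0 ≤ zi) (hj0 : 0 ≤ ji)
    (hz : zi.toNat < s.length) (hj : ji.toNat < s.length) :
    pvAltSwap s zi ji = (s.set zi.toNat (s.getD ji.toNat 0)).set ji.toNat (s.getD zi.toNat 0) := by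
  apply List.ext_getElem
  · simp [pvAltSwap, PySem.List.length_enumerate]
  · intro k hk1 hk2
    have hk : k < s.length := by
      simpa [pvAltSwap, PySem.List.length_enumerate] using hk1
    have e1 : ((k : Int) = zi) = (k = zi.toNat) := by apply propext; omega
    have e2 : ((k : Int) = ji) = (k = ji.toNat) := by apply propext; omega
    simp only [pvAltSwap, List.getElem_map, PySem.List.getElem_enumerate, zero_add,
      List.getElem_set, List.getD_eq_getElem?_getD,
      List.getElem?_eq_getElem hz, List.getElem?_eq_getElem hj, Option.getD_some, e1, e2]
    split_ifs <;> (try omega) <;> (exact getElem_congr rfl (by omega) (by omega))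

-- the table lookup for each concrete blank position, by rfl
lemma pvNb0 : PySem.Dict.getD pvNeighbors 0 [] = [(3, "DOWN"), (1, "RIGHT")] := by rfl
lemma pvNb1 : PySem.Dict.getD pvNeighbors 1 [] = [(4, "DOWN"), (0, "LEFT"), (2, "RIGHT")] := by rfl
lemma pvNb2 : PySem.Dict.getD pvNeighbors 2 [] = [(5, "DOWN"), (1, "LEFT")] := by rfl
lemma pvNb3 : PySem.Dict.getD pvNeighbors 3 [] = [(0, "UP"), (6, "DOWN"), (4, "RIGHT")] := by rfl
lemma pvNb4 : PySem.Dict.getD pvNeighbors 4 [] = [(1, "UP"), (7, "DOWN"), (3, "LEFT"), (5, "RIGHT")] := by rfl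
lemma pvNb5 : PySem.Dict.getD pvNeighbors 5 [] = [(2, "UP"), (8, "DOWN"), (4, "LEFT")] := by rfl
lemma pvNb6 : PySem.Dict.getD pvNeighbors 6 [] = [(3, "UP"), (7, "RIGHT")] := by rfl
lemma pvNb7 : PySem.Dict.getD pvNeighbors 7 [] = [(4, "UP"), (6, "LEFT"), (8, "RIGHT")] := by rfl
lemma pvNb8 : PySem.Dict.getD pvNeighbors 8 [] = [(5, "UP"), (7, "LEFT")] := by rfl

-- ===== VERDICT (by name: the statement is the Claim_ definition above) =====
theorem get_possible_moves_with_names_spec : Claim_equal_get_possible_moves_with_names := by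
  intro s _ hpre
  unfold Spec_get_possible_moves_with_names
  cases h : PySem.List.index? s 0 with
  | none =>
      simp only [get_possible_moves_with_names, get_possible_moves_with_names_alt, h]
      norm_num
  | some z =>
      have hmem : (0 : Int) ∈ s :=
        (PySem.List.index?_isSome_iff s 0).mp (by rw [h]; rfl)
      have hlen : s.length = 9 := by
        cases hpre with
        | inl hh => exact absurd hmem hh
        | inr hh => exact hh
      obtain ⟨hz, -, -⟩ := PySem.List.getElem_of_index?_eq_some h
      rw [hlen] at hz
      simp only [get_possible_moves_with_names, get_possible_moves_with_names_alt, h]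
      interval_cases z <;>
        norm_num [pvNb0, pvNb1, pvNb2, pvNb3, pvNb4, pvNb5, pvNb6, pvNb7, pvNb8,
          PySem.Int.floordiv, PySem.Int.mod, Int.fdiv, Int.fmod,
          pvAltSwap_eq_set_set, hlen]
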